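-- pv_equiv track=rewrite | github.com/meggerrsss/Advent | 2020/2020d6.py | tosetpart2
-- ===== SOURCE A (Python) =====
-- def tosetpart2(li):
--   setted = [0] * len(li)
--   for x in range(len(li)):
--     splitfirst = li[x].split('\n')
--     splitfirst = [set(t) for t in splitfirst]
--     setted[x] = set(splitfirst[0])
--     for y in splitfirst:
--       setted[x] = setted[x].intersection(y)
--     numpeep = li[x].count('\n')+1
--   return setted
-- ===== SOURCE B (Python) =====
-- def tosetpart2(li):
--     res = []
--     for g in li:
--         lines = g.split('\n')
--         n = len(lines)
--         cnt = {}
--         for line in lines: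
--             for c in set(line):
--                 cnt[c] = cnt.get(c, 0) + 1
--         res.append({c for c, v in cnt.items() if v == n})
--     return res
-- ===== Notes on version B (the rewrite author's own statement) =====
-- stated objective: idiomatic
-- what changed: Replaces the per-line set construction with iterative pairwise intersection by a single frequency table over each line's distinct characters, keeping the characters whose count equals the number of lines.
import Mathlib
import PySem

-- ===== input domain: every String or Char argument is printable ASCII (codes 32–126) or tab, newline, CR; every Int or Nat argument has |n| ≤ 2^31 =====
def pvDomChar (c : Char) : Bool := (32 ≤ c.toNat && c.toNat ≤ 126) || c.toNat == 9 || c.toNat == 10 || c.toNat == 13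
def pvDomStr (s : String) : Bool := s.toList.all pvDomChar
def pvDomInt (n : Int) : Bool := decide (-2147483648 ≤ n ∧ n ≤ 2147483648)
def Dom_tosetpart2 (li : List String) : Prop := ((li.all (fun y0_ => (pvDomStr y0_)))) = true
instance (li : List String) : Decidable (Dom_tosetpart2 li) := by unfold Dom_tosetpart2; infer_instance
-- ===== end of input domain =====

-- B replaces iterative per-line set intersection by one character-frequency table per group (count == number of lines); same results, a different decomposition.

-- set(t) for a string t: the set of its characters as 1-character strings (used by both ports)
def pyCharSet (t : String) : PySem.Set String :=
  PySem.Set.ofList (t.toList.map (fun c => String.ofList [c]))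

-- ===== PORT A =====
def tosetpart2 (li : List String) : List (List String) :=
  -- 'setted = [0] * len(li)': integer placeholders; every slot is overwritten by the loop, ported as []
  let setted : List (List String) := List.replicate li.length []
  (PySem.List.pyRange 0 (PySem.List.len li) 1).foldl (fun setted x =>
    let splitfirst := (PySem.Str.split? (PySem.List.pyGetD li x "") "\n").getD []  -- sep "\n" ≠ "": split? is always some
    let splitfirst := splitfirst.map (fun t => pyCharSet t)
    let s0 : PySem.Set String := PySem.Set.ofList (PySem.List.pyGetD splitfirst 0 [])
    let s := splitfirst.foldl (fun acc y => PySem.Set.inter acc y) s0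
    let _numpeep : Int := (PySem.Str.count (PySem.List.pyGetD li x "") "\n" : Int) + 1  -- unused in A
    PySem.List.pySetD setted x s) setted

-- ===== PORT B =====
def tosetpart2_alt (li : List String) : List (List String) :=
  li.foldl (fun res g =>
    let lines := (PySem.Str.split? g "\n").getD []  -- sep "\n" ≠ "": split? is always some
    let n : Int := PySem.List.len lines
    let cnt : PySem.Dict String Int :=
      lines.foldl (fun d line =>
        (pyCharSet line).foldl (fun d c => d.insert c (d.getD c 0 + 1)) d)
        PySem.Dict.empty
    res ++ [PySem.Set.ofList ((cnt.items.filter (fun p => p.2 == n)).map (fun p => p.1))]) []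

-- ===== PRECONDITION & SPEC =====
def Spec_tosetpart2 (li : List String) (out : List (List String)) : Prop := out = tosetpart2_alt li
instance (li : List String) (out : List (List String)) : Decidable (Spec_tosetpart2 li out) := by unfold Spec_tosetpart2; infer_instance

-- ===== CLAIM (what is proved, stated in full; the proofs are below) =====
def Claim_equal_tosetpart2 : Prop := ∀ (li : List String), Dom_tosetpart2 li → Spec_tosetpart2 li (tosetpart2 li)

-- ===== LEMMAS AND PROOFS =====

-- the value A computes for one group string g
def groupA (g : String) : List String :=
  let splitfirst := ((PySem.Str.split? g "\n").getD []).map (fun t => pyCharSet t)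
  splitfirst.foldl (fun acc y => PySem.Set.inter acc y)
    (PySem.Set.ofList (PySem.List.pyGetD splitfirst 0 []))

-- the value B computes for one group string g
def groupB (g : String) : List String :=
  let lines := (PySem.Str.split? g "\n").getD []
  let cnt : PySem.Dict String Int :=
    lines.foldl (fun d line =>
      (pyCharSet line).foldl (fun d c => d.insert c (d.getD c 0 + 1)) d)
      PySem.Dict.empty
  PySem.Set.ofList ((cnt.items.filter (fun p => p.2 == (PySem.List.len lines))).map (fun p => p.1))

-- filling slots j..len-1 of acc: A's index loop writes groupA (li[x]) into slot x
lemma fillA (li : List String) :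
    ∀ (n j : Nat), j + n = li.length → ∀ (acc : List (List String)), acc.length = li.length →
    (PySem.List.pyRange (j : Int) (PySem.List.len li) 1).foldl
      (fun setted x => PySem.List.pySetD setted x (groupA (PySem.List.pyGetD li x ""))) acc
    = acc.take j ++ (li.drop j).map groupA := by
  intro n
  induction n with
  | zero =>
    intro j hj acc hacc
    have hempty : PySem.List.pyRange (j : Int) (PySem.List.len li) 1 = [] := by
      simp [PySem.List.pyRange]; omega
    rw [hempty, List.foldl_nil, List.take_of_length_le (show acc.length ≤ j by omega),
      List.drop_of_length_le (show li.length ≤ j by omega), List.map_nil, List.append_nil]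
  | succ m ih =>
    intro j hj acc hacc
    have hjlt : (j : Int) < PySem.List.len li := by simp [PySem.List.len_eq]; omega
    have hjl : j < li.length := by omega
    rw [PySem.List.pyRange_one_cons hjlt]
    show List.foldl _
        (PySem.List.pySetD acc (j : Int) (groupA (PySem.List.pyGetD li (j : Int) ""))) _ = _
    have hg : PySem.List.pyGetD li (j : Int) "" = li[j] := by
      simp [PySem.List.pyGetD_natCast, List.getD, List.getElem?_eq_getElem hjl]
    have hcast : ((j : Int) + 1) = ((j + 1 : Nat) : Int) := by push_cast; ring
    rw [PySem.List.pySetD_natCast, hg, hcast,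
      ih (j + 1) (by omega) (acc.set j (groupA li[j])) (by simp [hacc])]
    rw [List.take_add_one, List.take_set]
    rw [List.set_eq_of_length_le (by simp)]
    rw [List.getElem?_set_self (show j < acc.length by omega)]
    rw [List.drop_eq_getElem_cons hjl, List.map_cons]
    simp

lemma loopA (li : List String) :
    tosetpart2 li = li.map groupA := by
  have h := fillA li li.length 0 (by omega) (List.replicate li.length []) (by simp)
  simp only [Nat.cast_zero, List.take_zero, List.drop_zero, List.nil_append] at h
  exact h

-- B's append loop is a map
lemma loopB (li : List String) :
    tosetpart2_alt li = li.map groupB := by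
  show li.foldl (fun res g => res ++ [groupB g]) [] = li.map groupB
  rw [PySem.List.foldl_append_singleton_eq_map groupB li []]
  rfl

-- folding intersections filters the start set by membership in every set of the list
lemma foldl_inter_eq_filter (sets : List (PySem.Set String)) (s : PySem.Set String) :
    sets.foldl (fun acc y => PySem.Set.inter acc y) s
      = s.filter (fun c => sets.all (fun t => t.contains c)) := by
  induction sets generalizing s with
  | nil => simp
  | cons t ts ih =>
    show ts.foldl _ (PySem.Set.inter s t) = _
    rw [ih]
    show (s.filter (fun x => t.contains x)).filter _ = _
    rw [List.filter_filter]
    exact List.filter_congr (fun x _ => by simp [List.all_cons, Bool.and_comm])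

-- the nested counting loop is Counter over the concatenation of the per-line distinct characters
lemma cnt_eq_counter (lines : List String) :
    lines.foldl (fun d line =>
        (pyCharSet line).foldl (fun d c => d.insert c (d.getD c 0 + 1)) d)
      PySem.Dict.empty
      = PySem.Dict.counter (lines.flatMap pyCharSet) := by
  rw [← PySem.Dict.foldl_insert_getD_add_one_eq_counter]
  generalize (PySem.Dict.empty : PySem.Dict String Int) = d
  induction lines generalizing d with
  | nil => rfl
  | cons l ls ih => simp [List.flatMap_cons, List.foldl_append, ih]

-- occurrences of k in the concatenated distinct-character lists = number of lines containing k
lemma count_flatMap_pyCharSet (lines : List String) (k : String) :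
    (lines.flatMap pyCharSet).count k = lines.countP (fun l => (pyCharSet l).contains k) := by
  induction lines with
  | nil => rfl
  | cons l ls ih =>
    have hc : (pyCharSet l).count k = if k ∈ pyCharSet l then 1 else 0 :=
      List.Nodup.count (PySem.Set.nodup_ofList _)
    simp only [List.flatMap_cons, List.count_append, List.countP_cons, ih, hc,
      PySem.Set.contains]
    by_cases h : k ∈ pyCharSet l <;> simp [h]
    omega

-- adding further elements to a set cannot change the part selected by a predicate that only holds inside s
lemma foldl_add_filter (T : List String) (P : String → Bool) :
    ∀ (s : List String), (∀ k, P k = true → k ∈ s) →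
    (T.foldl PySem.Set.add s).filter P = s.filter P := by
  induction T with
  | nil => intro s _; rfl
  | cons t ts ih =>
    intro s h
    show (ts.foldl PySem.Set.add (PySem.Set.add s t)).filter P = _
    by_cases hc : t ∈ s
    · rw [show PySem.Set.add s t = s by simp [PySem.Set.add, hc]]
      exact ih s h
    · rw [show PySem.Set.add s t = s ++ [t] by simp [PySem.Set.add, hc]]
      rw [ih (s ++ [t]) (fun k hk => List.mem_append_left _ (h k hk)), List.filter_append]
      have hPt : P t = false := by
        cases hP : P t
        · rfl
        · exact absurd (h t hP) hc
      simp [hPt]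

lemma filter_ofList_append (S0 T : List String) (P : String → Bool) (hn : S0.Nodup)
    (h : ∀ k, P k = true → k ∈ S0) :
    (PySem.Set.ofList (S0 ++ T)).filter P = S0.filter P := by
  have he : PySem.Set.ofList (S0 ++ T) = T.foldl PySem.Set.add S0 := by
    rw [PySem.Set.ofList_eq_foldl, List.foldl_append, ← PySem.Set.ofList_eq_foldl,
      PySem.Set.ofList_eq_self_of_nodup _ hn]
  rw [he, foldl_add_filter T P S0 h]

lemma nodup_pyCharSet (t : String) : (pyCharSet t).Nodup := PySem.Set.nodup_ofList _

lemma groupA_eq_groupB (g : String) : groupA g = groupB g := by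
  dsimp only [groupA, groupB]
  rw [cnt_eq_counter]
  generalize (PySem.Str.split? g "\n").getD [] = lines
  cases lines with
  | nil => rfl
  | cons l0 ls =>
    -- notation
    set L := (l0 :: ls).flatMap pyCharSet with hL
    set Q : String → Bool := fun k => ((List.count k L : Int) == PySem.List.len (l0 :: ls)) with hQ
    have hQ_iff : ∀ k, Q k = true ↔ ∀ line ∈ l0 :: ls, k ∈ pyCharSet line := by
      intro k
      rw [hQ]
      simp only [beq_iff_eq, PySem.List.len_eq, Int.natCast_inj]
      rw [hL, count_flatMap_pyCharSet]
      constructor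
      · intro hlen line hline
        have := (List.countP_eq_length.mp hlen) line hline
        simpa [PySem.Set.contains] using this
      · intro hall
        exact List.countP_eq_length.mpr (fun line hline => by
          simpa [PySem.Set.contains] using hall line hline)
    -- the RHS is (ofList L).filter Q
    have hrhs : ((PySem.Dict.counter L).items.filter
          (fun p => p.2 == PySem.List.len (l0 :: ls))).map (fun p => p.1)
        = (PySem.Set.ofList L).filter Q := by
      rw [PySem.Dict.items_counter, List.filter_map, List.map_map]
      dsimp only [Function.comp_def]
      exact List.map_id' _
    rw [hrhs, PySem.Set.ofList_eq_self_of_nodup _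
      (List.Nodup.filter Q (PySem.Set.nodup_ofList L))]
    -- the LHS is (pyCharSet l0) filtered by membership in every line's set
    simp only [List.map_cons]
    rw [foldl_inter_eq_filter, PySem.List.pyGetD_zero_cons,
      PySem.Set.ofList_eq_self_of_nodup (pyCharSet l0) (PySem.Set.nodup_ofList _)]
    -- both sides filter pyCharSet l0
    have hsplit : L = pyCharSet l0 ++ ls.flatMap pyCharSet := by rw [hL]; rfl
    rw [hsplit, filter_ofList_append (pyCharSet l0) (ls.flatMap pyCharSet) Q (nodup_pyCharSet l0)
      (fun k hk => (hQ_iff k).mp hk l0 (List.mem_cons_self))]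
    refine List.filter_congr (fun k _ => ?_)
    rw [Bool.eq_iff_iff, List.all_eq_true, hQ_iff k]
    constructor
    · intro h line hline
      rcases List.mem_cons.mp hline with rfl | hline'
      · simpa [PySem.Set.contains] using h (pyCharSet line) List.mem_cons_self
      · simpa [PySem.Set.contains] using
          h (pyCharSet line) (List.mem_cons_of_mem _ (List.mem_map_of_mem hline'))
    · intro h t ht
      rcases List.mem_cons.mp ht with rfl | ht'
      · simpa [PySem.Set.contains] using h l0 List.mem_cons_self
      · obtain ⟨line, hline, rfl⟩ := List.mem_map.mp ht'
        simpa [PySem.Set.contains] using h line (List.mem_cons_of_mem _ hline)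

-- ===== VERDICT (by name: the statement is the Claim_ definition above) =====
theorem tosetpart2_spec : Claim_equal_tosetpart2 := by
  intro li _
  show tosetpart2 li = tosetpart2_alt li
  rw [loopA, loopB]
  exact List.map_congr_left (fun g _ => groupA_eq_groupB g)
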